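-- pv_equiv track=rewrite | github.com/leelesemann-sys/pharma-pipeline-intelligence | ingest_clinicaltrials.py | map_phase
-- ===== SOURCE A (Python) =====
-- PHASE_MAP = {
--     "EARLY_PHASE1": "early_phase1",
--     "PHASE1": "phase1",
--     "PHASE2": "phase2",
--     "PHASE3": "phase3",
--     "PHASE4": "phase4",
--     "NA": "na",
-- }
--
-- def map_phase(phases_list):
--     """Map API phases to our schema. Take highest phase."""
--     if not phases_list:
--         return "na"
--     # Phase priority (higher = later)
--     priority = {"na": 0, "early_phase1": 1, "phase1": 2, "phase2": 3, "phase3": 4, "phase4": 5}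
--     mapped = []
--     for p in phases_list:
--         mapped_phase = PHASE_MAP.get(p.upper().replace(" ", ""), "na")
--         mapped.append(mapped_phase)
--
--     # Handle combined phases like ["PHASE1", "PHASE2"] -> phase1_phase2
--     if len(mapped) == 2:
--         sorted_phases = sorted(mapped, key=lambda x: priority.get(x, 0))
--         combo = f"{sorted_phases[0]}_{sorted_phases[1]}"
--         valid_combos = {"phase1_phase2", "phase2_phase3"}
--         if combo in valid_combos:
--             return combo
--
--     # Return highest single phase
--     return max(mapped, key=lambda x: priority.get(x, 0))
-- ===== SOURCE B (Python) =====
-- _PHASE_BIT = {"NA": 1, "EARLY_PHASE1": 2, "PHASE1": 4, "PHASE2": 8, "PHASE3": 16, "PHASE4": 32}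
-- _NAMES = ["na", "early_phase1", "phase1", "phase2", "phase3", "phase4"]
--
-- def map_phase(phases_list):
--     """Map API phases to our schema. Take highest phase."""
--     if not phases_list:
--         return "na"
--     mask = 0
--     for p in phases_list:
--         mask |= _PHASE_BIT.get(p.upper().replace(" ", ""), 1)
--     if len(phases_list) == 2:
--         if mask == 0b001100:      # exactly {phase1, phase2}
--             return "phase1_phase2"
--         if mask == 0b011000:      # exactly {phase2, phase3}
--             return "phase2_phase3"
--     return _NAMES[mask.bit_length() - 1]
-- ===== Notes on version B (the rewrite author's own statement) =====
-- stated objective: alternative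
-- what changed: B accumulates a 6-bit presence bitmask in a single pass (each phase string ORs in its power-of-two), reads the highest phase off the mask's bit_length into a name table, and detects the two valid combos by comparing the mask against two constants, replacing A's mapped-string list, pair sort and string-keyed max scan.
import Mathlib
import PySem

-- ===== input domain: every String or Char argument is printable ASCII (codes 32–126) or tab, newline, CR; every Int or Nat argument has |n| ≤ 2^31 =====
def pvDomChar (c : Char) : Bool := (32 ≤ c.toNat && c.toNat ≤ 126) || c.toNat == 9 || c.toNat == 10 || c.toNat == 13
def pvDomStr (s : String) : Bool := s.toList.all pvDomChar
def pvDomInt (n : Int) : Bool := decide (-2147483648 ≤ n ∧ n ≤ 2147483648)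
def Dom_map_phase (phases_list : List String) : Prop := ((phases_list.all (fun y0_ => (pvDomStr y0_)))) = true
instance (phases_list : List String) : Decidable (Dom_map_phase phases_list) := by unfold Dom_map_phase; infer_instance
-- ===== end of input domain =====

-- B replaces A's mapped-string list, pair sort and string-keyed max scan by a single-pass
-- 6-bit presence bitmask: highest phase = bit_length of the mask, combos = two mask constants
-- (alternative algorithm / data structure; same cost).

-- ===== PORT A =====
def PHASE_MAP : PySem.Dict String String :=
  PySem.Dict.mk [("EARLY_PHASE1","early_phase1"),("PHASE1","phase1"),("PHASE2","phase2"),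
                 ("PHASE3","phase3"),("PHASE4","phase4"),("NA","na")]

def pvPriorityA : PySem.Dict String Int :=
  PySem.Dict.mk [("na",0),("early_phase1",1),("phase1",2),("phase2",3),("phase3",4),("phase4",5)]

def map_phase (phases_list : List String) : String :=
  if phases_list = [] then "na"
  else
    -- for p in phases_list: mapped.append(PHASE_MAP.get(p.upper().replace(" ", ""), "na"))
    let mapped := phases_list.foldl
      (fun acc p => acc ++ [PHASE_MAP.getD (PySem.Str.replace (PySem.Str.upper p) " " "") "na"]) []
    if mapped.length = 2 then
      let sorted_phases := PySem.List.sorted mapped (fun x => pvPriorityA.getD x 0) false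
      let combo := PySem.List.pyGetD sorted_phases 0 "" ++ "_" ++ PySem.List.pyGetD sorted_phases 1 ""
      if combo = "phase1_phase2" ∨ combo = "phase2_phase3" then combo
      else (PySem.List.max? mapped (fun x => pvPriorityA.getD x 0)).getD "na"   -- max on nonempty list; default unreachable
    else (PySem.List.max? mapped (fun x => pvPriorityA.getD x 0)).getD "na"     -- max on nonempty list; default unreachable

-- ===== PORT B =====
def pvPhaseBit : PySem.Dict String Nat :=
  PySem.Dict.mk [("NA",1),("EARLY_PHASE1",2),("PHASE1",4),("PHASE2",8),("PHASE3",16),("PHASE4",32)]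

def pvNames : List String := ["na","early_phase1","phase1","phase2","phase3","phase4"]

-- Python's int.bit_length() on a non-negative int, via fuel-structural halving (fuel n suffices:
-- bit_length n ≤ n for n ≥ 1); exact on Nat
def pvBitLenFuel : Nat → Nat → Nat
  | 0, _ => 0
  | fuel+1, n => if n = 0 then 0 else pvBitLenFuel fuel (n / 2) + 1

def pvBitLength (n : Nat) : Nat := pvBitLenFuel n n

def map_phase_alt (phases_list : List String) : String :=
  if phases_list = [] then "na"
  else
    let mask := phases_list.foldl
      (fun m p => m ||| pvPhaseBit.getD (PySem.Str.replace (PySem.Str.upper p) " " "") 1) 0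
    let tail := PySem.List.pyGetD pvNames ((pvBitLength mask : Int) - 1) ""   -- _NAMES[mask.bit_length() - 1]
    if phases_list.length = 2 then
      if mask = 12 then "phase1_phase2"
      else if mask = 24 then "phase2_phase3"
      else tail
    else tail

-- ===== PRECONDITION & SPEC =====
def Spec_map_phase (phases_list : List String) (out : String) : Prop := out = map_phase_alt phases_list
instance (phases_list : List String) (out : String) : Decidable (Spec_map_phase phases_list out) := by unfold Spec_map_phase; infer_instance

-- ===== CLAIM (what is proved, stated in full; the proofs are below) =====
def Claim_equal_map_phase : Prop := ∀ (phases_list : List String), Dom_map_phase phases_list → Spec_map_phase phases_list (map_phase phases_list)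

-- ===== LEMMAS AND PROOFS =====

-- A's mapped name and B's bit, as functions of the raw phase string
def pvAMap (p : String) : String :=
  PHASE_MAP.getD (PySem.Str.replace (PySem.Str.upper p) " " "") "na"
def pvBBit (p : String) : Nat :=
  pvPhaseBit.getD (PySem.Str.replace (PySem.Str.upper p) " " "") 1

def pvSix : List (String × Nat) :=
  [("na",1),("early_phase1",2),("phase1",4),("phase2",8),("phase3",16),("phase4",32)]

-- both dicts are looked up at the same key, so the (name, bit) pair lands in one of six cases
lemma pvElem6 (p : String) : (pvAMap p, pvBBit p) ∈ pvSix := by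
  unfold pvAMap pvBBit
  generalize (PySem.Str.replace (PySem.Str.upper p) " " "") = s
  by_cases h1 : s = "EARLY_PHASE1"
  · subst h1; decide
  by_cases h2 : s = "PHASE1"
  · subst h2; decide
  by_cases h3 : s = "PHASE2"
  · subst h3; decide
  by_cases h4 : s = "PHASE3"
  · subst h4; decide
  by_cases h5 : s = "PHASE4"
  · subst h5; decide
  by_cases h6 : s = "NA"
  · subst h6; decide
  have g1 : ("EARLY_PHASE1" == s) = false := beq_eq_false_iff_ne.mpr (Ne.symm h1)
  have g2 : ("PHASE1" == s) = false := beq_eq_false_iff_ne.mpr (Ne.symm h2)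
  have g3 : ("PHASE2" == s) = false := beq_eq_false_iff_ne.mpr (Ne.symm h3)
  have g4 : ("PHASE3" == s) = false := beq_eq_false_iff_ne.mpr (Ne.symm h4)
  have g5 : ("PHASE4" == s) = false := beq_eq_false_iff_ne.mpr (Ne.symm h5)
  have g6 : ("NA" == s) = false := beq_eq_false_iff_ne.mpr (Ne.symm h6)
  simp [PHASE_MAP, pvPhaseBit, pvSix, PySem.Dict.getD, PySem.Dict.get?, List.find?,
        g1, g2, g3, g4, g5, g6]

-- the accumulator step of Python max(mapped, key=priority), as max? unfolds
def pvStep (acc : Option String) (x : String) : Option String :=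
  match acc with
  | none => some x
  | some m => if pvPriorityA.getD m 0 < pvPriorityA.getD x 0 then some x else some m

def pvStep' (m x : String) : String :=
  if pvPriorityA.getD m 0 < pvPriorityA.getD x 0 then x else m

lemma pvMax?_eq_foldl (l : List String) :
    PySem.List.max? l (fun x => pvPriorityA.getD x 0) = l.foldl pvStep none := by
  unfold PySem.List.max?
  refine congrFun (congrArg (fun f => List.foldl f none) ?_) l
  funext acc x
  cases acc <;> rfl

lemma pvFoldSome (l : List String) (m : String) :
    l.foldl pvStep (some m) = some (l.foldl pvStep' m) := by
  induction l generalizing m with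
  | nil => rfl
  | cons x l ih =>
    show l.foldl pvStep (pvStep (some m) x) = _
    have : pvStep (some m) x = some (pvStep' m x) := by
      simp only [pvStep, pvStep']; split_ifs <;> rfl
    rw [this]; exact ih (pvStep' m x)

-- invariant linking A's running max name with B's running mask
def pvGood (m : String) (mask : Nat) : Prop :=
  mask < 64 ∧ 0 < mask ∧
  PySem.List.pyGetD pvNames ((pvBitLength mask : Int) - 1) "" = m ∧
  pvPriorityA.getD m 0 = (pvBitLength mask : Int) - 1

lemma pvGoodInit : ∀ pr ∈ pvSix, pvGood pr.1 (0 ||| pr.2) := by unfold pvGood; decide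

lemma pvGoodStep : ∀ mask < 64, 0 < mask → ∀ pr ∈ pvSix,
    pvGood (pvStep' (PySem.List.pyGetD pvNames ((pvBitLength mask : Int) - 1) "") pr.1)
           (mask ||| pr.2) := by unfold pvGood; decide

lemma pvGoodInit' (s : String) (b : Nat) (hm : (s, b) ∈ pvSix) : pvGood s (0 ||| b) :=
  pvGoodInit (s, b) hm

lemma pvGoodStep' (s : String) (b : Nat) (hm : (s, b) ∈ pvSix)
    (mask : Nat) (hlt : mask < 64) (hpos : 0 < mask) :
    pvGood (pvStep' (PySem.List.pyGetD pvNames ((pvBitLength mask : Int) - 1) "") s)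
           (mask ||| b) :=
  pvGoodStep mask hlt hpos (s, b) hm

lemma pvFoldInv (t : List String) (m : String) (mask : Nat) (h : pvGood m mask) :
    pvGood ((t.map pvAMap).foldl pvStep' m)
           (t.foldl (fun mk p => mk ||| pvBBit p) mask) := by
  induction t generalizing m mask with
  | nil => exact h
  | cons p t ih =>
    simp only [List.map_cons, List.foldl_cons]
    obtain ⟨hlt, hpos, hname, hprio⟩ := h
    have hstep := pvGoodStep' (pvAMap p) (pvBBit p) (pvElem6 p) mask hlt hpos
    rw [hname] at hstep
    exact ih _ _ hstep

-- the two ports' "highest single phase" expressions agree on any non-empty list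
lemma pvMaxMain (p : String) (rest : List String) :
    (PySem.List.max? ((p :: rest).map pvAMap) (fun x => pvPriorityA.getD x 0)).getD "na"
      = PySem.List.pyGetD pvNames
          ((pvBitLength ((p :: rest).foldl (fun mk q => mk ||| pvBBit q) 0) : Int) - 1) "" := by
  have h0 : pvGood (pvAMap p) (0 ||| pvBBit p) := pvGoodInit' (pvAMap p) (pvBBit p) (pvElem6 p)
  have h := pvFoldInv rest (pvAMap p) (0 ||| pvBBit p) h0
  rw [pvMax?_eq_foldl, List.map_cons, List.foldl_cons]
  have hs : pvStep none (pvAMap p) = some (pvAMap p) := rfl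
  rw [hs, pvFoldSome, Option.getD_some, List.foldl_cons]
  exact h.2.2.1.symm

-- ===== VERDICT (by name: the statement is the Claim_ definition above) =====
set_option maxHeartbeats 2000000 in
theorem map_phase_spec : Claim_equal_map_phase := by
  intro phases_list _hdom
  unfold Spec_map_phase map_phase map_phase_alt
  cases phases_list with
  | nil => simp
  | cons p rest =>
    rw [if_neg (by simp : ¬(p :: rest) = []), if_neg (by simp : ¬(p :: rest) = [])]
    have hA : ∀ s, PHASE_MAP.getD (PySem.Str.replace (PySem.Str.upper s) " " "") "na" = pvAMap s := fun _ => rfl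
    have hB : ∀ s, pvPhaseBit.getD (PySem.Str.replace (PySem.Str.upper s) " " "") 1 = pvBBit s := fun _ => rfl
    simp only [PySem.List.foldl_append_singleton_eq_map, List.nil_append, hA, hB,
               List.length_map, List.length_cons]
    rcases rest with _ | ⟨q, rest2⟩
    · -- one element: both take the plain bit_length / max branch
      rw [if_neg (by simp), if_neg (by simp)]
      exact pvMaxMain p []
    rcases rest2 with _ | ⟨r, rest3⟩
    · -- exactly two elements: finite case analysis over the six possible (name, bit) pairs of each
      have hp := pvElem6 p
      have hq := pvElem6 q
      simp only [pvSix, List.mem_cons, List.not_mem_nil, or_false, Prod.mk.injEq] at hp hq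
      simp only [List.map_cons, List.map_nil, List.length_cons, List.length_nil, List.foldl_cons, List.foldl_nil]
      rcases hp with ⟨h1, h2⟩ | ⟨h1, h2⟩ | ⟨h1, h2⟩ | ⟨h1, h2⟩ | ⟨h1, h2⟩ | ⟨h1, h2⟩ <;>
        rcases hq with ⟨h3, h4⟩ | ⟨h3, h4⟩ | ⟨h3, h4⟩ | ⟨h3, h4⟩ | ⟨h3, h4⟩ | ⟨h3, h4⟩ <;>
        rw [h1, h2, h3, h4] <;> decide
    · -- three or more: both take the plain branch
      rw [if_neg (by simp), if_neg (by simp)]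
      exact pvMaxMain p (q :: r :: rest3)
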